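-- pv_equiv track=rewrite | github.com/DemchaAV/Wine-List | generate_realistic_dessert_images.py | update_scotts_images
-- ===== SOURCE A (Python) =====
-- from typing import Dict, List
--
-- def update_scotts_images(items: List[dict], paths_by_name: Dict[str, str]) -> int:
--     updated = 0
--     for item in items:
--         name = item.get("name")
--         if name in paths_by_name:
--             item["image"] = paths_by_name[name]
--             updated += 1
--     return updated
-- ===== SOURCE B (Python) =====
-- def update_scotts_images(items, paths_by_name):
--     # Group items by name once, then drive the loop over the paths mapping.
--     groups = {}
--     for item in items:
--         groups.setdefault(item.get("name"), []).append(item)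
--     updated = 0
--     for name, path in paths_by_name.items():
--         if name in groups:
--             for item in groups[name]:
--                 item["image"] = path
--             updated += len(groups[name])
--     return updated
-- ===== Notes on version B (the rewrite author's own statement) =====
-- stated objective: alternative
-- what changed: B builds a name->items index in one pass and then loops over the paths mapping, updating whole groups and adding their sizes, instead of scanning items and looking each name up in the dict.
import Mathlib
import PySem

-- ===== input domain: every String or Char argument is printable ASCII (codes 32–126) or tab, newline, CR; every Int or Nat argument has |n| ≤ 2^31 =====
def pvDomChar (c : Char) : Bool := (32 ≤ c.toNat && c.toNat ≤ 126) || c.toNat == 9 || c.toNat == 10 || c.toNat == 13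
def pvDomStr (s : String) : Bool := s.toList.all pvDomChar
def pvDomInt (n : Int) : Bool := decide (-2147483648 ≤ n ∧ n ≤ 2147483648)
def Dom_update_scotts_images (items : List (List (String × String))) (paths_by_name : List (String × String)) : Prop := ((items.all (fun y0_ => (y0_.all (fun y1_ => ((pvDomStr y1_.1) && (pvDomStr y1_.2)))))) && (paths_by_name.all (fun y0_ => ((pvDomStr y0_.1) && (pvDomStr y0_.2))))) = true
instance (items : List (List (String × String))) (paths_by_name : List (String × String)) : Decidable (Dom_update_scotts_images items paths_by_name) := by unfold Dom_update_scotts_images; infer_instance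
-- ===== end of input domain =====

-- B groups the items by name once and then drives the loop over the paths mapping (alternative
-- decomposition, same cost); B performs the same in-place image updates as A, the theorem is
-- about the returned count.


-- ===== PORT A =====
-- item.get("name"): first-match lookup in the association list standing for the item dict
def pvName (item : List (String × String)) : Option String :=
  (PySem.Dict.mk item).get? "name"

-- port of A: scan the items, look each name up in paths_by_name, count the hits
-- (the 'item["image"] = …' assignment does not affect the returned count)
def update_scotts_images (items : List (List (String × String))) (paths_by_name : List (String × String)) : Int :=
  items.foldl (fun updated item =>
    match pvName item with
    | some name => if (PySem.Dict.mk paths_by_name).contains name then updated + 1 else updated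
    | none => updated) 0

-- ===== PORT B =====
-- B's first loop: groups.setdefault(item.get("name"), []).append(item)  =  modify with default []
def pvGroups (items : List (List (String × String))) :
    PySem.Dict (Option String) (List (List (String × String))) :=
  items.foldl (fun d item => d.modify (pvName item) [] (· ++ [item])) PySem.Dict.empty

-- port of B: build the index, then loop over the paths mapping adding each present group's size
-- (the inner 'item["image"] = path' loop does not affect the returned count)
def update_scotts_images_alt (items : List (List (String × String))) (paths_by_name : List (String × String)) : Int :=
  paths_by_name.foldl (fun updated p =>
    if (pvGroups items).contains (some p.1) then
      updated + ((pvGroups items).getD (some p.1) []).length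
    else updated) 0

-- ===== PRECONDITION & SPEC =====
-- Pre_ requires the association list standing for the Python dict paths_by_name to have distinct
-- keys — the invariant every real Python dict satisfies (a list with duplicated keys is not the
-- image of any dict, so this excludes nothing A's Python is ever called on).
def Pre_update_scotts_images (items : List (List (String × String))) (paths_by_name : List (String × String)) : Prop :=
  (paths_by_name.map Prod.fst).Nodup
instance (items : List (List (String × String))) (paths_by_name : List (String × String)) : Decidable (Pre_update_scotts_images items paths_by_name) := by unfold Pre_update_scotts_images; infer_instance
def pvWitness_update_scotts_images : (List (List (String × String))) × (List (String × String)) :=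
  ([[("name", "a")], [("name", "a")], [("x", "y")]], [("a", "p1"), ("b", "p2")])

def Spec_update_scotts_images (items : List (List (String × String))) (paths_by_name : List (String × String)) (out : Int) : Prop := out = update_scotts_images_alt items paths_by_name
instance (items : List (List (String × String))) (paths_by_name : List (String × String)) (out : Int) : Decidable (Spec_update_scotts_images items paths_by_name out) := by unfold Spec_update_scotts_images; infer_instance

-- ===== CLAIM (what is proved, stated in full; the proofs are below) =====
def Claim_equal_update_scotts_images : Prop := ∀ (items : List (List (String × String))) (paths_by_name : List (String × String)), Dom_update_scotts_images items paths_by_name → Pre_update_scotts_images items paths_by_name → Spec_update_scotts_images items paths_by_name (update_scotts_images items paths_by_name)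

-- ===== LEMMAS AND PROOFS =====

lemma contains_mk_eq (l : List (String × String)) (m : String) :
    (PySem.Dict.mk l).contains m = (l.map Prod.fst).contains m := by
  simp [PySem.Dict.contains_mk, List.mem_map, List.any_eq]

-- the group stored for key k is exactly the sublist of items named k
lemma groups_getD (items : List (List (String × String))) (k : Option String) :
    (pvGroups items).getD k [] = items.filter (fun it => pvName it == k) := by
  have h : pvGroups items
      = (items.map (fun it => (pvName it, it))).foldl (fun d p => d.modify p.1 [] (· ++ [p.2]))
        PySem.Dict.empty := by
    unfold pvGroups; rw [List.foldl_map]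
  rw [h, PySem.Dict.getD_foldl_modify_append]
  simp [List.filter_map, Function.comp_def]

lemma countP_disj {α : Type} (l : List α) (q r : α → Bool) (h : ∀ x ∈ l, q x = true → r x = false) :
    l.countP (fun x => q x || r x) = l.countP q + l.countP r := by
  induction l with
  | nil => simp
  | cons a t ih =>
    have ht : ∀ x ∈ t, q x = true → r x = false := fun x hx => h x (List.mem_cons_of_mem _ hx)
    have := h a (List.mem_cons_self)
    simp only [List.countP_cons, ih ht]
    cases hq : q a <;> cases hr : r a <;> simp_all <;> omega

-- the per-path group sizes sum to A's count, provided the path keys are distinct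
lemma sum_groups (items : List (List (String × String))) :
    ∀ (paths : List (String × String)), (paths.map Prod.fst).Nodup →
    (paths.map (fun p => ((items.filter (fun it => pvName it == some p.1)).length : Int))).sum
      = (items.countP (fun it =>
          match pvName it with
          | some n => (PySem.Dict.mk paths).contains n
          | none => false) : Int) := by
  intro paths
  induction paths with
  | nil =>
    simp only [List.map_nil, List.sum_nil]
    rw [List.countP_eq_zero.mpr (by intro it _; cases h : pvName it <;> simp_all)]
    simp
  | cons p rest ih =>
    intro hnd
    simp only [List.map_cons, List.nodup_cons, List.mem_map] at hnd ⊢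
    rw [List.sum_cons, ih hnd.2]
    have hsplit : items.countP (fun it =>
          match pvName it with
          | some n => (PySem.Dict.mk (p :: rest)).contains n
          | none => false)
        = items.countP (fun it => pvName it == some p.1) + items.countP (fun it =>
          match pvName it with
          | some n => (PySem.Dict.mk rest).contains n
          | none => false) := by
      have hc := countP_disj items (fun it => pvName it == some p.1)
        (fun it => match pvName it with
          | some n => (PySem.Dict.mk rest).contains n
          | none => false)
        (by
          intro it _ hq
          match hm : pvName it with
          | none => simp [hm] at hq
          | some m =>
            simp only [hm, beq_iff_eq, Option.some.injEq] at hq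
            subst hq
            simp only [hm]
            rw [contains_mk_eq]
            simp only [List.contains_eq_mem, decide_eq_false_iff_not]
            intro hmem
            obtain ⟨q, hq2, hq3⟩ := List.mem_map.mp hmem
            exact hnd.1 ⟨q, hq2, hq3⟩)
      rw [← hc]
      apply List.countP_congr
      intro it _
      match hm : pvName it with
      | none => simp [hm]
      | some m =>
        simp only [hm, PySem.Dict.contains_mk, List.any_cons]
        rcases eq_or_ne m p.1 with h | h
        · subst h; simp
        · simp [h, Ne.symm h]
    rw [hsplit]
    simp only [List.countP_eq_length_filter]
    push_cast
    ring

-- A's fold counts the items whose name is a key of paths_by_name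
lemma a_eq_countP (items : List (List (String × String))) (paths_by_name : List (String × String)) :
    update_scotts_images items paths_by_name
      = (items.countP (fun it =>
          match pvName it with
          | some n => (PySem.Dict.mk paths_by_name).contains n
          | none => false) : Int) := by
  unfold update_scotts_images
  have hstep : (fun (updated : Int) (item : List (String × String)) =>
      match pvName item with
      | some name => if (PySem.Dict.mk paths_by_name).contains name then updated + 1 else updated
      | none => updated)
    = (fun updated item =>
        if (match pvName item with
            | some n => (PySem.Dict.mk paths_by_name).contains n
            | none => false) then updated + 1 else updated) := by
    funext updated item
    cases h : pvName item <;> rfl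
  rw [hstep, PySem.List.foldl_if_add_one]
  simp

-- B's fold adds the size of each name's group, empty when the name is absent from the index
lemma b_eq_sum (items : List (List (String × String))) (paths_by_name : List (String × String)) :
    update_scotts_images_alt items paths_by_name
      = (paths_by_name.map
          (fun p => ((items.filter (fun it => pvName it == some p.1)).length : Int))).sum := by
  unfold update_scotts_images_alt
  have hstep : ∀ (updated : Int) (p : String × String), p ∈ paths_by_name →
      (if (pvGroups items).contains (some p.1) then
        updated + ((pvGroups items).getD (some p.1) []).length
      else updated)
      = updated + ((items.filter (fun it => pvName it == some p.1)).length : Int) := by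
    intro updated p _
    cases hc : (pvGroups items).contains (some p.1)
    · have hempty : items.filter (fun it => pvName it == some p.1) = [] := by
        rw [← groups_getD items (some p.1)]
        exact PySem.Dict.getD_of_not_contains _ _ hc
      simp [hempty]
    · simp [groups_getD]
  rw [PySem.List.foldl_congr_mem paths_by_name _
      (fun updated p =>
        updated + ((items.filter (fun it => pvName it == some p.1)).length : Int))
      0 (fun updated p hp => hstep updated p hp)]
  rw [PySem.List.foldl_add]
  simp

-- ===== VERDICT (by name: the statement is the Claim_ definition above) =====
theorem update_scotts_images_spec : Claim_equal_update_scotts_images := by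
  intro items paths_by_name _ hpre
  unfold Spec_update_scotts_images
  rw [a_eq_countP, b_eq_sum, sum_groups items paths_by_name hpre]
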